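-- pv_equiv track=rewrite | github.com/kylemeador/symdesign | structure/sequence.py | pdb_to_pose_offset
-- ===== SOURCE A (Python) =====
-- from typing import Sequence, Any, Iterable, get_args, Literal, Iterator, AnyStr, Type
--
-- def pdb_to_pose_offset(reference_sequence: dict[Any, Sequence]) -> dict[Any, int]:
--     """Take a dictionary with chain name as keys and return the length of Pose numbering offset
--
--     Args:
--         reference_sequence: {key1: 'MSGKLDA...', ...} or {key2: {1: 'A', 2: 'S', ...}, ...}
--     Returns:
--         {key1: 0, key2: 123, ...}
--     """
--     offset = {}
--     # prior_chain = None
--     prior_chains_len = prior_key = 0  # prior_key not used as 0 but to ensure initialized nonetheless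
--     for idx, key in enumerate(reference_sequence):
--         if idx > 0:
--             prior_chains_len += len(reference_sequence[prior_key])
--         offset[key] = prior_chains_len
--         # insert function here? Make this a decorator!?
--         prior_key = key
--
--     return offset
-- ===== SOURCE B (Python) =====
-- def pdb_to_pose_offset(reference_sequence):
--     """Walk the items in reverse, deriving each offset from the grand total by
--     subtracting suffix lengths, then reverse the collected pairs."""
--     remaining = sum(len(v) for v in reference_sequence.values())
--     out = []
--     for key, value in reversed(list(reference_sequence.items())):
--         remaining -= len(value)
--         out.append((key, remaining))
--     out.reverse()
--     return dict(out)
-- ===== Notes on version B (the rewrite author's own statement) =====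
-- stated objective: alternative
-- what changed: Instead of a forward pass accumulating prior lengths with a prior-key re-lookup, B sums all lengths once and then traverses the items in reverse, computing each offset as total minus the suffix lengths, building the output back-to-front and reversing it.
import Mathlib
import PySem

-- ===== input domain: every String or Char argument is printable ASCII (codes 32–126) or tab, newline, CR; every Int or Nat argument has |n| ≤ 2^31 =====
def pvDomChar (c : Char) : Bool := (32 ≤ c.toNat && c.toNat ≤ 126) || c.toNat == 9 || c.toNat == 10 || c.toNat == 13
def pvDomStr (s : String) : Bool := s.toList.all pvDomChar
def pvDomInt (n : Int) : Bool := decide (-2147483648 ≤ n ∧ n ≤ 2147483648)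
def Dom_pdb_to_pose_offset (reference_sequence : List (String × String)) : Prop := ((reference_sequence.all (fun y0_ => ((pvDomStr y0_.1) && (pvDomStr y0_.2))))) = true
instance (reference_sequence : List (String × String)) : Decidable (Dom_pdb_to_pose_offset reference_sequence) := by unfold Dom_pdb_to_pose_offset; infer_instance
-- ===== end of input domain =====

-- B replaces A's forward pass (running total of prior lengths, with a prior-key re-lookup)
-- by a reverse traversal: sum all lengths once, subtract suffix lengths while walking the
-- items backwards, build the output back-to-front and reverse it — objective: alternative.

-- ===== PORT A =====
-- Python A: prior_key is initialised to the int 0 and only ever looked up after being overwritten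
-- by a real key; we initialise it to "" (the lookup at idx = 0 is never taken, as in Python).
-- reference_sequence[prior_key] (KeyError impossible: prior_key was iterated) → Dict.getD.
def pdb_to_pose_offset (reference_sequence : List (String × String)) : List (String × Int) :=
  let d := PySem.Dict.mk reference_sequence
  let st := (PySem.List.enumerate (PySem.Dict.keys d) 0).foldl
    (fun (st : PySem.Dict String Int × Int × String) p =>
      let pcl : Int := if p.1 > 0 then st.2.1 + PySem.Str.len (PySem.Dict.getD d st.2.2 "") else st.2.1
      (st.1.insert p.2 pcl, pcl, p.2))
    (PySem.Dict.empty, 0, "")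
  st.1.items

-- ===== PORT B =====
def pdb_to_pose_offset_alt (reference_sequence : List (String × String)) : List (String × Int) :=
  -- remaining = sum(len(v) for v in reference_sequence.values())
  let remaining := (reference_sequence.map Prod.snd).foldl (fun a v => a + PySem.Str.len v) 0
  -- for key, value in reversed(list(reference_sequence.items())): remaining -= len(value); out.append((key, remaining))
  let st := reference_sequence.reverse.foldl
    (fun (st : Int × List (String × Int)) p =>
      (st.1 - PySem.Str.len p.2, st.2 ++ [(p.1, st.1 - PySem.Str.len p.2)]))
    (remaining, [])
  -- out.reverse(); return dict(out)
  (PySem.Dict.ofList st.2.reverse).items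

-- ===== PRECONDITION & SPEC =====
-- Pre_ excludes association lists with duplicate keys: a Python dict can never contain them, so such
-- lists encode no input of A; on them the encoding's first-match lookup/overwrite order is accidental.
def Pre_pdb_to_pose_offset (reference_sequence : List (String × String)) : Prop :=
  (reference_sequence.map Prod.fst).Nodup
instance (reference_sequence : List (String × String)) : Decidable (Pre_pdb_to_pose_offset reference_sequence) := by unfold Pre_pdb_to_pose_offset; infer_instance
def pvWitness_pdb_to_pose_offset : (List (String × String)) := [("A", "MS"), ("B", "GKL"), ("C", "X")]

def Spec_pdb_to_pose_offset (reference_sequence : List (String × String)) (out : List (String × Int)) : Prop := out = pdb_to_pose_offset_alt reference_sequence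
instance (reference_sequence : List (String × String)) (out : List (String × Int)) : Decidable (Spec_pdb_to_pose_offset reference_sequence out) := by unfold Spec_pdb_to_pose_offset; infer_instance

-- ===== CLAIM (what is proved, stated in full; the proofs are below) =====
def Claim_equal_pdb_to_pose_offset : Prop := ∀ (reference_sequence : List (String × String)), Dom_pdb_to_pose_offset reference_sequence → Pre_pdb_to_pose_offset reference_sequence → Spec_pdb_to_pose_offset reference_sequence (pdb_to_pose_offset reference_sequence)

-- ===== LEMMAS AND PROOFS =====

-- Reference result: key k gets the running total c; then add len v.
def pvOffs : List (String × String) → Int → List (String × Int)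
  | [], _ => []
  | (k, v) :: t, c => (k, c) :: pvOffs t (c + PySem.Str.len v)

lemma pv_offs_fst : ∀ (t : List (String × String)) (c : Int),
    (pvOffs t c).map Prod.fst = t.map Prod.fst
  | [], _ => rfl
  | (k, v) :: t, c => by simp [pvOffs, pv_offs_fst t]

-- B's reverse loop: starting from c plus the total length of t, walking t backwards and
-- subtracting lengths appends exactly (pvOffs t c).reverse and ends at c.
lemma pv_revloop (t : List (String × String)) (c : Int) (acc : List (String × Int)) :
    t.reverse.foldl
      (fun (st : Int × List (String × Int)) p =>
        (st.1 - PySem.Str.len p.2, st.2 ++ [(p.1, st.1 - PySem.Str.len p.2)]))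
      (c + ((t.map Prod.snd).map PySem.Str.len).sum, acc)
      = (c, acc ++ (pvOffs t c).reverse) := by
  induction t generalizing c acc with
  | nil => simp [pvOffs]
  | cons p t' ih =>
    obtain ⟨k, v⟩ := p
    rw [List.reverse_cons, List.foldl_append]
    have harith : c + ((((k, v) :: t').map Prod.snd).map PySem.Str.len).sum
        = (c + PySem.Str.len v) + ((t'.map Prod.snd).map PySem.Str.len).sum := by
      simp; ring
    rw [harith, ih (c + PySem.Str.len v) acc]
    simp [pvOffs, add_sub_cancel_right]

lemma pv_items_ofList (l : List (String × Int)) (h : (l.map Prod.fst).Nodup) :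
    (PySem.Dict.ofList l).items = l := by
  show (PySem.Dict.empty.update l).items = l
  unfold PySem.Dict.update
  rw [PySem.Dict.items_foldl_insert_fresh l Prod.fst Prod.snd PySem.Dict.empty
      (fun a _ => PySem.Dict.contains_empty a.1) h]
  simp [PySem.Dict.empty]

-- One iteration of A's loop after the first (the branch idx > 0 always taken, idx itself unused).
def pvStepA (d : PySem.Dict String String) (st : PySem.Dict String Int × Int × String)
    (k : String) : PySem.Dict String Int × Int × String :=
  (st.1.insert k (st.2.1 + PySem.Str.len (PySem.Dict.getD d st.2.2 "")),
   st.2.1 + PySem.Str.len (PySem.Dict.getD d st.2.2 ""), k)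

lemma pv_foldl_enum_snd {σ : Type} (f : σ → String → σ) :
    ∀ (xs : List String) (s : Int) (init : σ),
    (PySem.List.enumerate xs s).foldl (fun a p => f a p.2) init = xs.foldl f init
  | [], _, _ => rfl
  | x :: xs, s, init => by
    rw [PySem.List.enumerate_cons, List.foldl_cons, List.foldl_cons,
      pv_foldl_enum_snd f xs (s + 1) (f init x)]

-- The tail of A's loop (all indices > 0, idx dropped): an invariant over the suffix t.
lemma pv_loopA (t : List (String × String)) (d : PySem.Dict String String)
    (off : PySem.Dict String Int) (pcl : Int) (pk vk : String)
    (hd : d.getD pk "" = vk)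
    (hmem : ∀ p ∈ t, d.getD p.1 "" = p.2)
    (hfresh : ∀ p ∈ t, off.contains p.1 = false)
    (hnd : (t.map Prod.fst).Nodup) :
    ((t.map Prod.fst).foldl (pvStepA d) (off, pcl, pk)).1.items
      = off.items ++ pvOffs t (pcl + PySem.Str.len vk) := by
  induction t generalizing off pcl pk vk with
  | nil => simp [pvOffs]
  | cons p t' ih =>
    obtain ⟨k, v⟩ := p
    simp only [List.map_cons, List.foldl_cons, pvStepA, hd] at *
    have hnd2 := List.nodup_cons.mp hnd
    have hk_notin : k ∉ t'.map Prod.fst := hnd2.1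
    rw [ih (off.insert k (pcl + PySem.Str.len vk)) (pcl + PySem.Str.len vk) k v
        (hmem (k, v) (by simp))
        (fun q hq => hmem q (List.mem_cons_of_mem _ hq))
        (fun q hq => by
          rw [PySem.Dict.contains_insert]
          have h1 : off.contains q.1 = false := hfresh q (List.mem_cons_of_mem _ hq)
          have h2 : q.1 ≠ k := by
            intro hEq
            exact hk_notin (hEq ▸ List.mem_map_of_mem hq)
          simp [h1, h2])
        hnd2.2]
    rw [PySem.Dict.items_insert_of_not_contains off _ (hfresh (k, v) (by simp))]
    simp [pvOffs]

lemma pv_A_eq_offs (rs : List (String × String)) (hpre : (rs.map Prod.fst).Nodup) :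
    pdb_to_pose_offset rs = pvOffs rs 0 := by
  cases rs with
  | nil => rfl
  | cons p t =>
    obtain ⟨k0, v0⟩ := p
    unfold pdb_to_pose_offset
    simp only [PySem.Dict.keys_mk, List.map_cons, PySem.List.enumerate_cons, List.foldl_cons]
    have hkeysnd : (PySem.Dict.mk ((k0, v0) :: t)).keys.Nodup := by
      simpa [PySem.Dict.keys_mk] using hpre
    have hmem : ∀ q ∈ (k0, v0) :: t, (PySem.Dict.mk ((k0, v0) :: t)).getD q.1 "" = q.2 := by
      intro q hq
      exact PySem.Dict.getD_of_mem_items _ (by simpa [PySem.Dict.items] using hq) hkeysnd ""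
    -- first iteration: idx = 0, branch not taken
    have h0 : ¬ ((0 : Int) > 0) := by omega
    simp only [h0, if_false]
    -- remaining iterations: every index is ≥ 1, so the branch is always taken
    rw [PySem.List.foldl_congr_mem _ _
      (fun (st : PySem.Dict String Int × Int × String) (p : Int × String) =>
        pvStepA (PySem.Dict.mk ((k0, v0) :: t)) st p.2) _
      (by
        intro acc x hx
        obtain ⟨j, hj, hxeq⟩ := (PySem.List.mem_enumerate_iff _ _ _).mp hx
        have hxpos : x.1 > 0 := by rw [hxeq]; simp; omega
        simp only [hxpos, if_true, pvStepA])]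
    rw [show List.map (fun (x : String × String) => x.1) t = t.map Prod.fst from rfl,
      show (0 : Int) + 1 = 1 from rfl,
      pv_foldl_enum_snd (pvStepA (PySem.Dict.mk ((k0, v0) :: t))) (t.map Prod.fst) 1 _]
    simp only [List.map_cons] at hpre
    have hpre2 := List.nodup_cons.mp hpre
    have hnd' : (t.map Prod.fst).Nodup := hpre2.2
    rw [pv_loopA t (PySem.Dict.mk ((k0, v0) :: t)) (PySem.Dict.empty.insert k0 0) 0 k0 v0
        (hmem (k0, v0) (by simp))
        (fun q hq => hmem q (List.mem_cons_of_mem _ hq))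
        (fun q hq => by
          rw [PySem.Dict.contains_insert]
          have h2 : q.1 ≠ k0 := by
            intro hEq
            exact hpre2.1 (hEq ▸ List.mem_map_of_mem hq)
          simp [h2, PySem.Dict.contains_empty])
        hnd']
    simp [pvOffs, PySem.Dict.empty, PySem.Dict.insert]

lemma pv_B_eq_offs (rs : List (String × String)) (hpre : (rs.map Prod.fst).Nodup) :
    pdb_to_pose_offset_alt rs = pvOffs rs 0 := by
  simp only [pdb_to_pose_offset_alt]
  have hsum : (rs.map Prod.snd).foldl (fun a v => a + PySem.Str.len v) 0
      = 0 + ((rs.map Prod.snd).map PySem.Str.len).sum := by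
    rw [PySem.List.foldl_add]
  rw [hsum, pv_revloop rs 0 []]
  simp only [List.nil_append, List.reverse_reverse]
  exact pv_items_ofList _ (by rw [pv_offs_fst]; exact hpre)

-- ===== VERDICT (by name: the statement is the Claim_ definition above) =====
theorem pdb_to_pose_offset_spec : Claim_equal_pdb_to_pose_offset := by
  intro rs _ hpre
  unfold Spec_pdb_to_pose_offset
  rw [pv_A_eq_offs rs hpre, pv_B_eq_offs rs hpre]
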